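-- pv_equiv track=rewrite | github.com/ProITScrape/fashion-scraper | sources/sources/spiders/shein_goods.py | get_adult_kid_gender
-- ===== SOURCE A (Python) =====
-- def get_adult_kid_gender(categories, name):
--     match = categories+[name]
--     women =["girl","women"]
--     men= ['men',"boy"]
--     kid = ["girl","boy"]
--     adult = ["men","women"]
--     for v in women:
--         for c in match:
--             if v in c.lower().split():
--                 gender = "F"
--                 break
--     for v in men:
--         for c in match:
--             if v in c.lower().split():
--                 gender = "M"
--                 break
--     for v in adult:
--         for c in match:
--             if v in c.lower().split():
--                 adult_kid = "Adult"
--                 break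
--     for v in kid:
--         for c in match:
--             if v in c.lower().split():
--                 adult_kid = "kid"
--                 break
--     return gender, adult_kid
-- ===== SOURCE B (Python) =====
-- def get_adult_kid_gender(categories, name):
--     words = set()
--     for c in categories + [name]:
--         words.update(c.lower().split())
--     if 'men' in words or 'boy' in words:
--         gender = 'M'
--     elif 'girl' in words or 'women' in words:
--         gender = 'F'
--     if 'girl' in words or 'boy' in words:
--         adult_kid = 'kid'
--     elif 'men' in words or 'women' in words:
--         adult_kid = 'Adult'
--     return gender, adult_kid
-- ===== Notes on version B (the rewrite author's own statement) =====
-- stated objective: simpler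
-- what changed: B builds one set of all lowercased whitespace-split words in a single pass and decides gender and adult_kid with two flat conditionals, replacing A's eight keyword-by-keyword rescans of the category list with last-write-wins overwrites.
import Mathlib
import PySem

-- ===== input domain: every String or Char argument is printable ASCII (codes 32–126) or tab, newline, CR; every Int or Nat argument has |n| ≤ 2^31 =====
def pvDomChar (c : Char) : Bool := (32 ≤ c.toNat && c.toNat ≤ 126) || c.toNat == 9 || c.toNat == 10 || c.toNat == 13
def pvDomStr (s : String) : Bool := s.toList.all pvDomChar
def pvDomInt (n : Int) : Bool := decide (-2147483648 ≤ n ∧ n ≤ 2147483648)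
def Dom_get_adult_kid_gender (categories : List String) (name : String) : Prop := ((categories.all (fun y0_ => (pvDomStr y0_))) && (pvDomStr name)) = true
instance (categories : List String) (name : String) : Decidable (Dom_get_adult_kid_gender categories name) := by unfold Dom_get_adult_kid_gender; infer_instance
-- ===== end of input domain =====

-- B builds the word set once and decides both labels with two flat conditionals instead of A's
-- eight rescans; equal return values are proved on Pre_ (some keyword present; elsewhere both
-- Pythons raise UnboundLocalError).


-- ===== PORT A =====
-- 'v in c.lower().split()'
def pvHit (v c : String) : Bool := (PySem.Str.split₀ (PySem.Str.lower c)).contains v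

-- one 'for c in match: if v in c.lower().split(): var = val; break' loop (var's previous value g)
def pvScan (v val : String) (ms : List String) (g : Option String) : Option String :=
  match ms with
  | [] => g
  | c :: rest => if pvHit v c then some val else pvScan v val rest g

-- the unset variables raise UnboundLocalError in Python; outside Pre_ the port returns "" there
def get_adult_kid_gender (categories : List String) (name : String) : String × String :=
  let m := categories ++ [name]
  let g1 := pvScan "girl" "F" m none
  let g2 := pvScan "women" "F" m g1
  let g3 := pvScan "men" "M" m g2
  let g4 := pvScan "boy" "M" m g3
  let a1 := pvScan "men" "Adult" m none
  let a2 := pvScan "women" "Adult" m a1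
  let a3 := pvScan "girl" "kid" m a2
  let a4 := pvScan "boy" "kid" m a3
  (g4.getD "", a4.getD "")

-- ===== PORT B =====
-- 'gender'/'adult_kid' unbound raises in Python B too; the port returns "" in that (excluded) case
def get_adult_kid_gender_alt (categories : List String) (name : String) : String × String :=
  let words : PySem.Set String :=
    (categories ++ [name]).foldl
      (fun s c => PySem.Set.update s (PySem.Str.split₀ (PySem.Str.lower c))) PySem.Set.empty
  let gender :=
    if PySem.Set.contains words "men" || PySem.Set.contains words "boy" then "M"
    else if PySem.Set.contains words "girl" || PySem.Set.contains words "women" then "F"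
    else ""
  let adult_kid :=
    if PySem.Set.contains words "girl" || PySem.Set.contains words "boy" then "kid"
    else if PySem.Set.contains words "men" || PySem.Set.contains words "women" then "Adult"
    else ""
  (gender, adult_kid)

-- ===== PRECONDITION & SPEC =====
-- Pre_ excludes exactly the inputs with no keyword word, on which both Pythons raise UnboundLocalError.
def Pre_get_adult_kid_gender (categories : List String) (name : String) : Prop :=
  ∃ c ∈ categories ++ [name], ∃ v ∈ (["men", "boy", "girl", "women"] : List String),
    v ∈ PySem.Str.split₀ (PySem.Str.lower c)
instance (categories : List String) (name : String) : Decidable (Pre_get_adult_kid_gender categories name) := by unfold Pre_get_adult_kid_gender; infer_instance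

def pvWitness_get_adult_kid_gender : List String × String := (["Men Shoes"], "girl dress")

def Spec_get_adult_kid_gender (categories : List String) (name : String) (out : String × String) : Prop := out = get_adult_kid_gender_alt categories name
instance (categories : List String) (name : String) (out : String × String) : Decidable (Spec_get_adult_kid_gender categories name out) := by unfold Spec_get_adult_kid_gender; infer_instance

-- ===== CLAIM (what is proved, stated in full; the proofs are below) =====
def Claim_equal_get_adult_kid_gender : Prop := ∀ (categories : List String) (name : String), Dom_get_adult_kid_gender categories name → Pre_get_adult_kid_gender categories name → Spec_get_adult_kid_gender categories name (get_adult_kid_gender categories name)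

-- ===== LEMMAS AND PROOFS =====

-- A's inner loop is 'if any category hits v then val else the previous value'
theorem pvScan_eq (v val : String) (ms : List String) (g : Option String) :
    pvScan v val ms g = if ms.any (pvHit v) then some val else g := by
  induction ms with
  | nil => simp [pvScan]
  | cons c rest ih => by_cases h : pvHit v c <;> simp [pvScan, h, ih]

theorem mem_words_gen (x : String) (l : List String) (s : PySem.Set String) :
    (x ∈ l.foldl (fun s c => PySem.Set.update s (PySem.Str.split₀ (PySem.Str.lower c))) s) ↔
      x ∈ s ∨ ∃ c ∈ l, x ∈ PySem.Str.split₀ (PySem.Str.lower c) := by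
  induction l generalizing s with
  | nil => simp
  | cons c rest ih =>
    rw [List.foldl_cons, ih, PySem.Set.mem_update, List.exists_mem_cons_iff]
    exact or_assoc

-- membership in B's accumulated word set = some category contains the word
theorem mem_words (x : String) (ms : List String) :
    (x ∈ ms.foldl (fun s c => PySem.Set.update s (PySem.Str.split₀ (PySem.Str.lower c)))
        PySem.Set.empty) ↔ ∃ c ∈ ms, x ∈ PySem.Str.split₀ (PySem.Str.lower c) := by
  rw [mem_words_gen]
  simp [PySem.Set.empty]

theorem hit_iff_mem (v c : String) :
    pvHit v c = true ↔ v ∈ PySem.Str.split₀ (PySem.Str.lower c) := by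
  simp [pvHit]

-- ===== VERDICT (by name: the statement is the Claim_ definition above) =====
theorem get_adult_kid_gender_spec : Claim_equal_get_adult_kid_gender := by
  intro categories name _ _
  unfold Spec_get_adult_kid_gender get_adult_kid_gender get_adult_kid_gender_alt
  simp only [pvScan_eq]
  set m := categories ++ [name] with hm
  have hc : ∀ v : String,
      PySem.Set.contains
        (m.foldl (fun s c => PySem.Set.update s (PySem.Str.split₀ (PySem.Str.lower c)))
          PySem.Set.empty) v = m.any (pvHit v) := by
    intro v
    rw [Bool.eq_iff_iff, PySem.Set.contains_iff, mem_words, List.any_eq_true]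
    simp only [hit_iff_mem]
  simp only [hc]
  by_cases h1 : m.any (pvHit "men") <;> by_cases h2 : m.any (pvHit "boy") <;>
    by_cases h3 : m.any (pvHit "girl") <;> by_cases h4 : m.any (pvHit "women") <;>
    simp [h1, h2, h3, h4]
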